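-- pv_equiv track=rewrite | github.com/jiportilla/ontology | python/taskadmin/core/svc/clean_gowords.py | _partial_match_unigrams
-- ===== SOURCE A (Python) =====
-- def _partial_match_unigrams(gowords: list,
--                             labels: list) -> list:
--     valid = ['design, designer',
--              'engineer, engineering',
--              'file, filenet',
--              'power, powerha',
--              'power, powersc',
--              'power, powervm',
--              'total, totalstorage',
--              'web, websphere']
--
--     s = set()
--     for label in labels:
--         for goword in gowords:
--             if label.startswith(goword):
--
--                 if " " not in label and " " not in goword:
--                     s.add(", ".join(sorted({label, goword})))
--
--     return [x for x in sorted(s)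
--             if x not in valid]
-- ===== SOURCE B (Python) =====
-- def _partial_match_unigrams(gowords: list,
--                             labels: list) -> list:
--     valid = ['design, designer',
--              'engineer, engineering',
--              'file, filenet',
--              'power, powerha',
--              'power, powersc',
--              'power, powervm',
--              'total, totalstorage',
--              'web, websphere']
--
--     gset = {g for g in gowords if " " not in g}
--
--     s = set()
--     for label in labels:
--         if " " in label:
--             continue
--         for i in range(len(label) + 1):
--             p = label[:i]
--             if p in gset:
--                 # p is a prefix of label, so p <= label; sorted({label, p}) is [p, label] (or [label] when equal)
--                 s.add(label if p == label else ", ".join([p, label]))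
--
--     return [x for x in sorted(s) if x not in valid]
-- ===== Notes on version B (the rewrite author's own statement) =====
-- stated objective: faster
-- what changed: Instead of testing every goword against every label with startswith, B builds a set of the space-free gowords once and, for each space-free label, looks up each of its prefixes in that set; since a matching goword is always a prefix of the label, the sorted two-element set join collapses to a direct concatenation.
import Mathlib
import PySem

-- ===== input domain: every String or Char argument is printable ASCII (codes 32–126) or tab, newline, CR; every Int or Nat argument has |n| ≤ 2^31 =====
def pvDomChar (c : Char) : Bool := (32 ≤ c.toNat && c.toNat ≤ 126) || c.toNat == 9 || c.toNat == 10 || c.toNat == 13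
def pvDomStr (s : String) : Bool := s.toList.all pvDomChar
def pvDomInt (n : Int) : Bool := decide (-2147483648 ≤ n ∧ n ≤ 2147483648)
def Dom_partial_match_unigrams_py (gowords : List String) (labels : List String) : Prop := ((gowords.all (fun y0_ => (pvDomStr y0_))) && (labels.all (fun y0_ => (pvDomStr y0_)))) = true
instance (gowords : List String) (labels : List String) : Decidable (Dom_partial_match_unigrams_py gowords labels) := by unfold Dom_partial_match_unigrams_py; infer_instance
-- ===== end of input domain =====

-- B replaces A's scan of all gowords per label by a set of space-free gowords probed with each
-- prefix of the label (asymptotically fewer startswith tests); equivalence of the built sets is proved.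

-- the 'valid' blacklist both Python versions define verbatim
def pvValidWords : List String :=
  ["design, designer", "engineer, engineering", "file, filenet", "power, powerha",
   "power, powersc", "power, powervm", "total, totalstorage", "web, websphere"]

-- ===== PORT A =====
-- ", ".join(sorted({label, goword}))
def pvPairA (label goword : String) : String :=
  PySem.Str.join ", " (PySem.List.sorted (PySem.Set.ofList [label, goword]) (fun x => x))

def pvSetA (gowords labels : List String) : PySem.Set String :=
  labels.foldl (fun s label =>
    gowords.foldl (fun s goword =>
      if PySem.Str.startswith label goword then
        if !PySem.Str.isIn " " label && !PySem.Str.isIn " " goword then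
          PySem.Set.add s (pvPairA label goword)
        else s
      else s) s) PySem.Set.empty

def partial_match_unigrams_py (gowords : List String) (labels : List String) : List String :=
  (PySem.List.sorted (pvSetA gowords labels) (fun x => x)).filter (fun x => !pvValidWords.contains x)

-- ===== PORT B =====
-- label[:i]
def pvPrefixB (label : String) (i : Int) : String := PySem.Str.slice label none (some i)

-- label if p == label else ", ".join([p, label])
def pvAddB (label p : String) : String :=
  if p == label then label else PySem.Str.join ", " [p, label]

def pvSetB (gowords labels : List String) : PySem.Set String :=
  let gset : PySem.Set String := PySem.Set.ofList (gowords.filter (fun g => !PySem.Str.isIn " " g))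
  labels.foldl (fun s label =>
    if PySem.Str.isIn " " label then s
    else (PySem.List.pyRange 0 (PySem.Str.len label + 1)).foldl (fun s i =>
      if PySem.Set.contains gset (pvPrefixB label i) then
        PySem.Set.add s (pvAddB label (pvPrefixB label i))
      else s) s) PySem.Set.empty

def partial_match_unigrams_py_alt (gowords : List String) (labels : List String) : List String :=
  (PySem.List.sorted (pvSetB gowords labels) (fun x => x)).filter (fun x => !pvValidWords.contains x)

-- ===== PRECONDITION & SPEC =====
def Spec_partial_match_unigrams_py (gowords : List String) (labels : List String) (out : List String) : Prop := out = partial_match_unigrams_py_alt gowords labels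
instance (gowords : List String) (labels : List String) (out : List String) : Decidable (Spec_partial_match_unigrams_py gowords labels out) := by unfold Spec_partial_match_unigrams_py; infer_instance

-- ===== CLAIM (what is proved, stated in full; the proofs are below) =====
def Claim_equal_partial_match_unigrams_py : Prop := ∀ (gowords : List String) (labels : List String), Dom_partial_match_unigrams_py gowords labels → Spec_partial_match_unigrams_py gowords labels (partial_match_unigrams_py gowords labels)

-- ===== LEMMAS AND PROOFS =====

-- membership in a fold that conditionally adds elements to an accumulator list
theorem pv_mem_foldl {α β : Type} (l : List α) (step : List β → α → List β) (P : α → Prop) (x : β)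
    (h : ∀ s e, x ∈ step s e ↔ x ∈ s ∨ P e) :
    ∀ s, x ∈ l.foldl step s ↔ x ∈ s ∨ ∃ e ∈ l, P e := by
  induction l with
  | nil => simp
  | cons a t ih =>
    intro s
    rw [List.foldl_cons, ih, h]
    simp only [List.mem_cons]
    constructor
    · rintro ((hx | hp) | ⟨e, he, hp⟩)
      · exact Or.inl hx
      · exact Or.inr ⟨a, Or.inl rfl, hp⟩
      · exact Or.inr ⟨e, Or.inr he, hp⟩
    · rintro (hx | ⟨e, (rfl | he), hp⟩)
      · exact Or.inl (Or.inl hx)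
      · exact Or.inl (Or.inr hp)
      · exact Or.inr ⟨e, he, hp⟩

theorem pv_nodup_foldl {α β : Type} (l : List α) (step : List β → α → List β)
    (h : ∀ s e, s.Nodup → (step s e).Nodup) :
    ∀ s, s.Nodup → (l.foldl step s).Nodup := by
  induction l with
  | nil => intro s hs; simpa using hs
  | cons a t ih => intro s hs; exact ih _ (h s a hs)

-- a proper prefix is lexicographically smaller (Python's string '<')
theorem pv_prefix_lt (g label : String) (hp : g.toList <+: label.toList) (hne : g ≠ label) :
    g.toList < label.toList := by
  obtain ⟨t, ht⟩ := hp
  have htne : t ≠ [] := by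
    rintro rfl
    simp only [List.append_nil] at ht
    exact hne (String.toList_inj.mp ht)
  rw [← ht]
  clear ht
  induction g.toList with
  | nil =>
    cases t with
    | nil => exact absurd rfl htne
    | cons a t' => exact List.Lex.nil
  | cons a l ih => exact List.Lex.cons ih

-- A's pair string equals B's pair string whenever g is a prefix of label
theorem pv_pair_eq (g label : String) (hp : g.toList <+: label.toList) :
    pvPairA label g = pvAddB label g := by
  unfold pvPairA pvAddB
  by_cases hgl : g = label
  · subst hgl
    have hy : PySem.List.sorted (PySem.Set.ofList [g, g]) (fun x => x) = [g] := by
      apply PySem.List.sorted_eq_of_perm_of_pairwise_lt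
      · rw [List.perm_ext_iff_of_nodup (by simp) (PySem.Set.nodup_ofList _)]
        intro a; simp [PySem.Set.mem_ofList]
      · simp
    rw [hy, if_pos (by simp)]
    apply String.toList_inj.mp
    rw [PySem.Str.toList_join]
    simp [PySem.Chars.join_singleton]
  · have hlt : g.toList < label.toList := pv_prefix_lt g label hp hgl
    have hy : PySem.List.sorted (PySem.Set.ofList [label, g]) (fun x => x) = [g, label] := by
      apply PySem.List.sorted_eq_of_perm_of_pairwise_lt
      · rw [List.perm_ext_iff_of_nodup (by simp [hgl]) (PySem.Set.nodup_ofList _)]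
        intro a; simp [PySem.Set.mem_ofList]; tauto
      · simp [hlt]
    rw [hy, if_neg (by simp [hgl])]

theorem pv_mem_innerA (gowords : List String) (label : String) (x : String) (s : PySem.Set String) :
    x ∈ gowords.foldl (fun s goword =>
      if PySem.Str.startswith label goword then
        if !PySem.Str.isIn " " label && !PySem.Str.isIn " " goword then
          PySem.Set.add s (pvPairA label goword)
        else s
      else s) s
    ↔ x ∈ s ∨ ∃ g ∈ gowords,
      PySem.Str.startswith label g = true ∧ PySem.Str.isIn " " label = false ∧
      PySem.Str.isIn " " g = false ∧ x = pvPairA label g := by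
  refine pv_mem_foldl _ _ _ x (fun s' g => ?_) s
  by_cases h1 : PySem.Str.startswith label g = true
  · rw [if_pos h1]
    by_cases h2 : (!PySem.Str.isIn " " label && !PySem.Str.isIn " " g) = true
    · rw [if_pos h2, PySem.Set.mem_add]
      simp only [Bool.and_eq_true, Bool.not_eq_true'] at h2
      constructor
      · rintro (hx | rfl)
        · exact Or.inl hx
        · exact Or.inr ⟨h1, h2.1, h2.2, rfl⟩
      · rintro (hx | ⟨_, _, _, rfl⟩)
        · exact Or.inl hx
        · exact Or.inr rfl
    · rw [if_neg h2]
      simp only [Bool.and_eq_true, Bool.not_eq_true'] at h2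
      constructor
      · exact Or.inl
      · rintro (hx | ⟨_, hl, hg, rfl⟩)
        · exact hx
        · exact absurd ⟨hl, hg⟩ h2
  · rw [if_neg h1]
    constructor
    · exact Or.inl
    · rintro (hx | ⟨hsw, _⟩)
      · exact hx
      · exact absurd hsw h1

theorem pv_mem_setA (gowords labels : List String) (x : String) :
    x ∈ pvSetA gowords labels ↔ ∃ label ∈ labels, ∃ g ∈ gowords,
      PySem.Str.startswith label g = true ∧ PySem.Str.isIn " " label = false ∧
      PySem.Str.isIn " " g = false ∧ x = pvPairA label g := by
  unfold pvSetA
  rw [pv_mem_foldl _ _ (fun label => ∃ g ∈ gowords,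
      PySem.Str.startswith label g = true ∧ PySem.Str.isIn " " label = false ∧
      PySem.Str.isIn " " g = false ∧ x = pvPairA label g) x
      (fun s label => pv_mem_innerA gowords label x s) PySem.Set.empty]
  simp [PySem.Set.empty]

theorem pv_mem_innerB (gset : PySem.Set String) (label : String) (x : String) (s : PySem.Set String) :
    x ∈ (PySem.List.pyRange 0 (PySem.Str.len label + 1)).foldl (fun s i =>
      if PySem.Set.contains gset (pvPrefixB label i) then
        PySem.Set.add s (pvAddB label (pvPrefixB label i))
      else s) s
    ↔ x ∈ s ∨ ∃ i ∈ PySem.List.pyRange 0 (PySem.Str.len label + 1),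
      PySem.Set.contains gset (pvPrefixB label i) = true ∧ x = pvAddB label (pvPrefixB label i) := by
  refine pv_mem_foldl _ _ _ x (fun s' i => ?_) s
  by_cases hc : PySem.Set.contains gset (pvPrefixB label i) = true
  · rw [if_pos hc, PySem.Set.mem_add]
    constructor
    · rintro (hx | rfl)
      · exact Or.inl hx
      · exact Or.inr ⟨hc, rfl⟩
    · rintro (hx | ⟨_, rfl⟩)
      · exact Or.inl hx
      · exact Or.inr rfl
  · rw [if_neg hc]
    constructor
    · exact Or.inl
    · rintro (hx | ⟨hc', _⟩)
      · exact hx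
      · exact absurd hc' hc

theorem pv_mem_setB (gowords labels : List String) (x : String) :
    x ∈ pvSetB gowords labels ↔ ∃ label ∈ labels,
      PySem.Str.isIn " " label = false ∧ ∃ i ∈ PySem.List.pyRange 0 (PySem.Str.len label + 1),
        PySem.Set.contains (PySem.Set.ofList (gowords.filter (fun g => !PySem.Str.isIn " " g)))
          (pvPrefixB label i) = true ∧ x = pvAddB label (pvPrefixB label i) := by
  unfold pvSetB
  rw [pv_mem_foldl _ _ (fun label =>
      PySem.Str.isIn " " label = false ∧ ∃ i ∈ PySem.List.pyRange 0 (PySem.Str.len label + 1),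
        PySem.Set.contains (PySem.Set.ofList (gowords.filter (fun g => !PySem.Str.isIn " " g)))
          (pvPrefixB label i) = true ∧ x = pvAddB label (pvPrefixB label i)) x ?_ PySem.Set.empty]
  · simp [PySem.Set.empty]
  · intro s label
    by_cases h2 : PySem.Str.isIn " " label = true
    · rw [if_pos h2]
      constructor
      · exact Or.inl
      · rintro (hx | ⟨hl, _⟩)
        · exact hx
        · rw [h2] at hl; cases hl
    · rw [if_neg h2]
      have hl : PySem.Str.isIn " " label = false := by
        revert h2; cases PySem.Str.isIn " " label <;> simp
      rw [pv_mem_innerB _ label x s]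
      constructor
      · rintro (hx | hex)
        · exact Or.inl hx
        · exact Or.inr ⟨hl, hex⟩
      · rintro (hx | ⟨_, hex⟩)
        · exact Or.inl hx
        · exact Or.inr hex

-- the per-label condition of A's inner loop matches B's prefix probing
theorem pv_key (gowords : List String) (label x : String) :
    (∃ g ∈ gowords, PySem.Str.startswith label g = true ∧ PySem.Str.isIn " " label = false ∧
        PySem.Str.isIn " " g = false ∧ x = pvPairA label g)
    ↔ (PySem.Str.isIn " " label = false ∧ ∃ i ∈ PySem.List.pyRange 0 (PySem.Str.len label + 1),
        PySem.Set.contains (PySem.Set.ofList (gowords.filter (fun g => !PySem.Str.isIn " " g)))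
          (pvPrefixB label i) = true ∧ x = pvAddB label (pvPrefixB label i)) := by
  constructor
  · rintro ⟨g, hg, hsw, hl, hgs, rfl⟩
    have hp : g.toList <+: label.toList := by
      rw [PySem.Str.startswith_eq] at hsw
      exact (PySem.Chars.startswith_iff _ _).mp hsw
    have hpeq : pvPrefixB label (g.toList.length : Int) = g := by
      apply String.toList_inj.mp
      show (PySem.Str.slice label none (some (g.toList.length : Int))).toList = _
      rw [PySem.Str.toList_slice]
      rw [show PySem.Chars.slice label.toList none (some (g.toList.length : Int))
            = List.take ((g.toList.length : Int)).toNat label.toList from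
          PySem.List.slice_to _ (by positivity)]
      simp only [Int.toNat_natCast]
      exact (List.prefix_iff_eq_take.mp hp).symm
    refine ⟨hl, (g.toList.length : Int), ?_, ?_, ?_⟩
    · rw [PySem.List.mem_pyRange_one]
      have := hp.length_le
      rw [PySem.Str.len_eq]
      omega
    · rw [hpeq, PySem.Set.contains_iff, PySem.Set.mem_ofList, List.mem_filter]
      refine ⟨hg, ?_⟩
      rw [Bool.not_eq_true']
      exact hgs
    · rw [hpeq]
      exact pv_pair_eq g label hp
  · rintro ⟨hl, i, hi, hc, rfl⟩
    rw [PySem.List.mem_pyRange_one] at hi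
    have hptl : (pvPrefixB label i).toList = label.toList.take i.toNat := by
      show (PySem.Str.slice label none (some i)).toList = _
      rw [PySem.Str.toList_slice]
      exact PySem.List.slice_to _ hi.1
    have hp : (pvPrefixB label i).toList <+: label.toList := by
      rw [hptl]; exact List.take_prefix _ _
    rw [PySem.Set.contains_iff, PySem.Set.mem_ofList, List.mem_filter] at hc
    refine ⟨pvPrefixB label i, hc.1, ?_, hl, ?_, (pv_pair_eq _ label hp).symm⟩
    · rw [PySem.Str.startswith_eq]
      exact (PySem.Chars.startswith_iff _ _).mpr hp
    · have := hc.2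
      rw [Bool.not_eq_true'] at this
      exact this

theorem pv_nodup_setA (gowords labels : List String) : (pvSetA gowords labels).Nodup := by
  unfold pvSetA
  refine pv_nodup_foldl _ _ (fun s label hs => ?_) _ List.nodup_nil
  refine pv_nodup_foldl _ _ (fun s' g hs' => ?_) _ hs
  split_ifs with h1 h2
  · exact PySem.Set.nodup_add _ _ hs'
  · exact hs'
  · exact hs'

theorem pv_nodup_setB (gowords labels : List String) : (pvSetB gowords labels).Nodup := by
  unfold pvSetB
  refine pv_nodup_foldl _ _ (fun s label hs => ?_) _ List.nodup_nil
  split_ifs with h1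
  · exact hs
  · refine pv_nodup_foldl _ _ (fun s' i hs' => ?_) _ hs
    split_ifs with hc
    · exact PySem.Set.nodup_add _ _ hs'
    · exact hs'

theorem pv_sets_perm (gowords labels : List String) :
    (pvSetA gowords labels).Perm (pvSetB gowords labels) := by
  rw [List.perm_ext_iff_of_nodup (pv_nodup_setA gowords labels) (pv_nodup_setB gowords labels)]
  intro a
  rw [pv_mem_setA, pv_mem_setB]
  constructor
  · rintro ⟨l, hl, h⟩; exact ⟨l, hl, (pv_key gowords l a).mp h⟩
  · rintro ⟨l, hl, h⟩; exact ⟨l, hl, (pv_key gowords l a).mpr h⟩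

-- ===== VERDICT (by name: the statement is the Claim_ definition above) =====
theorem partial_match_unigrams_py_spec : Claim_equal_partial_match_unigrams_py := by
  intro gowords labels _
  show partial_match_unigrams_py gowords labels = partial_match_unigrams_py_alt gowords labels
  unfold partial_match_unigrams_py partial_match_unigrams_py_alt
  rw [(PySem.List.sorted_id_eq_sorted_id_iff_perm _ _).mpr (pv_sets_perm gowords labels)]
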